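-- pv_equiv track=rewrite | github.com/LenzGit/OpenAniMusic | gui/detect_and_copy_staff_lines.py | merge_vertical_lines_connect
-- ===== SOURCE A (Python) =====
-- def compute_overlap(interval1, interval2):
--     """
--     interval1 = (x_start1, x_end1)
--     interval2 = (x_start2, x_end2)
--     Returns the number of overlapping pixels in the X direction (>= 0).
--     """
--     (s1, e1) = interval1
--     (s2, e2) = interval2
--     start = max(s1, s2)
--     end = min(e1, e2)
--     return max(0, end - start + 1)
--
-- def merge_vertical_lines_connect(segments, min_overlap_pixels=5):
--     """
--     Builds vertical groups by making each vertical line either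
--     joining an existing group (if can_merge_with_group_vertical==True)
--     or forms a new group.
--     """
--     groups = []
--     for line in segments:
--         found_group = None
--         for g in groups:
--             if can_merge_with_group_vertical(line, g, min_overlap_pixels):
--                 g.append(line)
--                 found_group = g
--                 break
--         if found_group is None:
--             groups.append([line])
--     return groups
--
-- def can_connect_vertical(lineA, lineB, min_overlap_pixels=5):
--     """
--     lineA, lineB = (x, y_start, y_end)
--     Checks whether:
--       1) |xA - xB| <= 1
--       2) y-ranges overlap at least 'min_overlap_pixels'
--     Returns True if lineA can connect directly to lineB.
--     """
--     (xA, yA_start, yA_end) = lineA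
--     (xB, yB_start, yB_end) = lineB
--     if abs(xA - xB) > 1:
--         return False
--     overlap = compute_overlap((yA_start, yA_end), (yB_start, yB_end))
--     if overlap < min_overlap_pixels:
--         return False
--     return True
--
-- def can_merge_with_group_vertical(new_line, group_lines, min_overlap_pixels=5):
--     """
--     new_line = (x, y_start, y_end)
--     group_lines = List of vertical lines [(x1, y1_start, y1_end), ...]
--     Checks whether 'new_line' can connect to at least one line in group_lines.
--     """
--     for line in group_lines:
--         if can_connect_vertical(new_line, line, min_overlap_pixels):
--             return True
--     return False
-- ===== SOURCE B (Python) =====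
-- def merge_vertical_lines_connect(segments, min_overlap_pixels=5):
--     """Flat single pass: assign each line the smallest existing group id among
--     connectable previous lines (new id otherwise), then bucket by id at the end."""
--     assign = []  # (line, gid) in input order
--     n = 0
--     for line in segments:
--         (x, ys, ye) = line
--         cands = [g for ((x2, s2, e2), g) in assign
--                  if abs(x - x2) <= 1
--                  and max(0, min(ye, e2) - max(ys, s2) + 1) >= min_overlap_pixels]
--         if cands:
--             gid = min(cands)
--         else:
--             gid = n
--             n += 1
--         assign.append((line, gid))
--     return [[l for (l, g) in assign if g == i] for i in range(n)]
-- ===== Notes on version B (the rewrite author's own statement) =====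
-- stated objective: alternative
-- what changed: A's nested scan over the list of groups (first group containing a connectable line, with early break and in-place append) is replaced by a single flat pass that assigns each line the minimal group id among connectable previously-assigned lines (fresh id otherwise) and reconstructs the groups by bucketing the assignment at the end; correctness rests on the fact that the first group with a connectable member is exactly the one with the smallest id.
import Mathlib
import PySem

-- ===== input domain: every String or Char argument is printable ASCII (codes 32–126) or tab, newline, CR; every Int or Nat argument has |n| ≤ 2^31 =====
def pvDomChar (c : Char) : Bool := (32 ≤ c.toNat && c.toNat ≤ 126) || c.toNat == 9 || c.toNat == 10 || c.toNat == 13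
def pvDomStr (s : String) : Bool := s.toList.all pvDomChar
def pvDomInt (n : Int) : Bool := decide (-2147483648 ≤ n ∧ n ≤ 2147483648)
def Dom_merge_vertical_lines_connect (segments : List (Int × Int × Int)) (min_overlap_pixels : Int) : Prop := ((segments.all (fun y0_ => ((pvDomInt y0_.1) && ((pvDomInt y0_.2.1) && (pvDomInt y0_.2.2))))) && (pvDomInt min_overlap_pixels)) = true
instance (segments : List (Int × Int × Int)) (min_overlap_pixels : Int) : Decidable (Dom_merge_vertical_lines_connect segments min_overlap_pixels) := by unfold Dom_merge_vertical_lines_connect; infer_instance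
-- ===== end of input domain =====

-- B replaces A's nested first-matching-group scan by a single flat pass that assigns each
-- line the minimal group id among connectable previous lines, bucketing by id at the end
-- (objective: alternative; same results, proved equivalent below).

-- ===== PORT A =====
def pvComputeOverlap (i1 i2 : Int × Int) : Int :=
  max 0 (min i1.2 i2.2 - max i1.1 i2.1 + 1)

def pvCanConnect (a b : Int × Int × Int) (m : Int) : Bool :=
  if |a.1 - b.1| > 1 then false
  else if pvComputeOverlap (a.2.1, a.2.2) (b.2.1, b.2.2) < m then false
  else true

def pvCanMergeGroup (line : Int × Int × Int) (g : List (Int × Int × Int)) (m : Int) : Bool :=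
  g.any (fun l => pvCanConnect line l m)

def pvTryInsert (line : Int × Int × Int) (m : Int) :
    List (List (Int × Int × Int)) → Option (List (List (Int × Int × Int)))
  | [] => none
  | g :: rest =>
      if pvCanMergeGroup line g m then some ((g ++ [line]) :: rest)
      else (pvTryInsert line m rest).map (g :: ·)

def merge_vertical_lines_connect (segments : List (Int × Int × Int)) (min_overlap_pixels : Int) :
    List (List (Int × Int × Int)) :=
  segments.foldl (fun groups line =>
    match pvTryInsert line min_overlap_pixels groups with
    | some gs => gs
    | none => groups ++ [[line]]) []

-- ===== PORT B =====
def pvConnB (line l : Int × Int × Int) (m : Int) : Bool :=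
  (|line.1 - l.1| ≤ 1) && (max 0 (min line.2.2 l.2.2 - max line.2.1 l.2.1 + 1) ≥ m)

def pvStepB (m : Int) (st : List ((Int × Int × Int) × Int) × Int) (line : Int × Int × Int) :
    List ((Int × Int × Int) × Int) × Int :=
  let cands := st.1.filterMap (fun p => if pvConnB line p.1 m then some p.2 else none)
  match PySem.List.min? cands (fun x => x) with
  | some g => (st.1 ++ [(line, g)], st.2)
  | none => (st.1 ++ [(line, st.2)], st.2 + 1)

def pvBuckets (assign : List ((Int × Int × Int) × Int)) (n : Int) : List (List (Int × Int × Int)) :=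
  (PySem.List.pyRange 0 n 1).map (fun i => (assign.filter (fun p => p.2 == i)).map (·.1))

def merge_vertical_lines_connect_alt (segments : List (Int × Int × Int)) (min_overlap_pixels : Int) :
    List (List (Int × Int × Int)) :=
  let st := segments.foldl (pvStepB min_overlap_pixels) ([], 0)
  pvBuckets st.1 st.2

-- ===== PRECONDITION & SPEC =====
def Spec_merge_vertical_lines_connect (segments : List (Int × Int × Int)) (min_overlap_pixels : Int) (out : List (List (Int × Int × Int))) : Prop := out = merge_vertical_lines_connect_alt segments min_overlap_pixels
instance (segments : List (Int × Int × Int)) (min_overlap_pixels : Int) (out : List (List (Int × Int × Int))) : Decidable (Spec_merge_vertical_lines_connect segments min_overlap_pixels out) := by unfold Spec_merge_vertical_lines_connect; infer_instance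

-- ===== CLAIM (what is proved, stated in full; the proofs are below) =====
def Claim_equal_merge_vertical_lines_connect : Prop := ∀ (segments : List (Int × Int × Int)) (min_overlap_pixels : Int), Dom_merge_vertical_lines_connect segments min_overlap_pixels → Spec_merge_vertical_lines_connect segments min_overlap_pixels (merge_vertical_lines_connect segments min_overlap_pixels)

-- ===== LEMMAS AND PROOFS =====

-- A's can_connect and B's inlined condition compute the same Bool
lemma pv_conn_eq (a b : Int × Int × Int) (m : Int) : pvCanConnect a b m = pvConnB a b m := by
  simp only [pvCanConnect, pvConnB, pvComputeOverlap]
  split_ifs with h1 h2 <;> simp <;> omega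

-- all group ids in the assignment are in [0, n)
def pvGidOk (assign : List ((Int × Int × Int) × Int)) (n : Int) : Prop :=
  ∀ p ∈ assign, 0 ≤ p.2 ∧ p.2 < n

lemma pv_mem_cands (assign : List ((Int × Int × Int) × Int)) (line : Int × Int × Int) (m g : Int) :
    g ∈ assign.filterMap (fun p => if pvConnB line p.1 m then some p.2 else none) ↔
      ∃ p ∈ assign, pvConnB line p.1 m = true ∧ p.2 = g := by
  simp [List.mem_filterMap]

lemma pv_bucket_merge (assign : List ((Int × Int × Int) × Int)) (line : Int × Int × Int) (m i : Int) :
    pvCanMergeGroup line ((assign.filter (fun p => p.2 == i)).map (·.1)) m = true ↔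
      i ∈ assign.filterMap (fun p => if pvConnB line p.1 m then some p.2 else none) := by
  rw [pv_mem_cands]
  simp only [pvCanMergeGroup, List.any_eq_true, List.mem_map, List.mem_filter, pv_conn_eq]
  constructor
  · rintro ⟨a, ⟨⟨b, gi⟩, ⟨hmem, hb⟩, rfl⟩, hc⟩
    simp at hb
    exact ⟨(b, gi), hmem, hc, hb⟩
  · rintro ⟨⟨b, gi⟩, hmem, hc, hb⟩
    exact ⟨b, ⟨(b, gi), ⟨hmem, by simpa using hb⟩, rfl⟩, hc⟩

lemma pv_tryInsert_none (line : Int × Int × Int) (m : Int) (gs : List (List (Int × Int × Int)))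
    (h : ∀ g ∈ gs, pvCanMergeGroup line g m = false) : pvTryInsert line m gs = none := by
  induction gs with
  | nil => rfl
  | cons g rest ih =>
      simp [pvTryInsert, h g (by simp)]
      exact ih (fun g' hg' => h g' (by simp [hg']))

lemma pv_tryInsert_some (line : Int × Int × Int) (m : Int)
    (gs1 gs2 : List (List (Int × Int × Int))) (g : List (Int × Int × Int))
    (h1 : ∀ g' ∈ gs1, pvCanMergeGroup line g' m = false)
    (h2 : pvCanMergeGroup line g m = true) :
    pvTryInsert line m (gs1 ++ g :: gs2) = some (gs1 ++ (g ++ [line]) :: gs2) := by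
  induction gs1 with
  | nil => simp [pvTryInsert, h2]
  | cons g' rest ih =>
      simp only [List.cons_append, pvTryInsert, h1 g' (by simp)]
      rw [ih (fun x hx => h1 x (by simp [hx]))]
      simp

lemma pv_step_eq (m : Int) (line : Int × Int × Int) (assign : List ((Int × Int × Int) × Int))
    (n : Int) (hn : 0 ≤ n) (hok : pvGidOk assign n) :
    (match pvTryInsert line m (pvBuckets assign n) with
     | some gs => gs
     | none => pvBuckets assign n ++ [[line]]) =
      pvBuckets (pvStepB m (assign, n) line).1 (pvStepB m (assign, n) line).2 ∧
    pvGidOk (pvStepB m (assign, n) line).1 (pvStepB m (assign, n) line).2 ∧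
    0 ≤ (pvStepB m (assign, n) line).2 := by
  set cands := assign.filterMap (fun p => if pvConnB line p.1 m then some p.2 else none) with hc
  rcases hmin : PySem.List.min? cands (fun x => x) with _ | g
  · -- no candidate: new group
    have hnil : cands = [] := (PySem.List.min?_eq_none_iff _ _).1 hmin
    have hstep : pvStepB m (assign, n) line = (assign ++ [(line, n)], n + 1) := by
      simp [pvStepB, ← hc, hmin]
    have hnone : pvTryInsert line m (pvBuckets assign n) = none := by
      apply pv_tryInsert_none
      intro g hg
      simp only [pvBuckets, List.mem_map] at hg
      obtain ⟨i, _, rfl⟩ := hg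
      rcases hb : pvCanMergeGroup line ((assign.filter (fun p => p.2 == i)).map (·.1)) m with _ | _
      · exact hb
      · exact absurd ((pv_bucket_merge assign line m i).1 hb) (by simp [← hc, hnil])
    rw [hstep, hnone]
    refine ⟨?_, ?_, by omega⟩
    · simp only [pvBuckets]
      rw [PySem.List.pyRange_one_succ_right hn, List.map_append]
      congr 1
      · apply List.map_congr_left
        intro i hi
        have hi' : i < n := (PySem.List.mem_pyRange_one.1 hi).2
        congr 1
        rw [List.filter_append]
        simp; omega
      · simp only [List.map_cons, List.map_nil, List.filter_append]
        have : assign.filter (fun p => p.2 == n) = [] := by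
          rw [List.filter_eq_nil_iff]
          intro p hp
          have := hok p hp
          simp; omega
        simp [this]
    · intro p hp
      rcases List.mem_append.1 hp with h | h
      · have := hok p h; omega
      · simp at h; subst h; simp; omega
  · -- candidate found: join group g
    have hgmem : g ∈ cands := PySem.List.min?_mem hmin
    have hgmin : ∀ y ∈ cands, g ≤ y := fun y hy => PySem.List.min?_isMin hmin y hy
    have hgbound : 0 ≤ g ∧ g < n := by
      obtain ⟨p, hp, _, hpg⟩ := (pv_mem_cands assign line m g).1 (hc ▸ hgmem)
      have := hok p hp; omega
    have hstep : pvStepB m (assign, n) line = (assign ++ [(line, g)], n) := by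
      simp [pvStepB, ← hc, hmin]
    have hsplit : PySem.List.pyRange 0 n 1 =
        PySem.List.pyRange 0 g 1 ++ g :: PySem.List.pyRange (g + 1) n 1 := by
      rw [PySem.List.pyRange_one_append 0 g n hgbound.1 (le_of_lt hgbound.2)]
      congr 1
      exact PySem.List.pyRange_one_cons hgbound.2
    have hsome : pvTryInsert line m (pvBuckets assign n) =
        some ((PySem.List.pyRange 0 g 1).map
                (fun i => (assign.filter (fun p => p.2 == i)).map (·.1)) ++
              ((assign.filter (fun p => p.2 == g)).map (·.1) ++ [line]) ::
              (PySem.List.pyRange (g + 1) n 1).map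
                (fun i => (assign.filter (fun p => p.2 == i)).map (·.1))) := by
      simp only [pvBuckets, hsplit, List.map_append, List.map_cons]
      apply pv_tryInsert_some
      · intro g' hg'
        simp only [List.mem_map] at hg'
        obtain ⟨i, hi, rfl⟩ := hg'
        have hi' : i < g := (PySem.List.mem_pyRange_one.1 hi).2
        rcases hb : pvCanMergeGroup line ((assign.filter (fun p => p.2 == i)).map (·.1)) m with _ | _
        · exact hb
        · have : i ∈ cands := hc ▸ (pv_bucket_merge assign line m i).1 hb
          have := hgmin i this; omega
      · exact (pv_bucket_merge assign line m g).2 (hc ▸ hgmem)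
    rw [hstep, hsome]
    refine ⟨?_, ?_, hn⟩
    · simp only [pvBuckets, hsplit, List.map_append, List.map_cons]
      congr 1
      · apply List.map_congr_left
        intro i hi
        have hi' : i < g := (PySem.List.mem_pyRange_one.1 hi).2
        congr 1
        rw [List.filter_append]; simp; omega
      · congr 1
        · rw [List.filter_append]
          simp
        · apply List.map_congr_left
          intro i hi
          have hi' : g + 1 ≤ i := (PySem.List.mem_pyRange_one.1 hi).1
          congr 1
          rw [List.filter_append]; simp; omega
    · intro p hp
      rcases List.mem_append.1 hp with h | h
      · have := hok p h; omega
      · simp at h; subst h; simp; omega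

lemma pv_fold_eq (m : Int) (segments : List (Int × Int × Int)) :
    ∀ (assign : List ((Int × Int × Int) × Int)) (n : Int), 0 ≤ n → pvGidOk assign n →
      segments.foldl (fun groups line =>
          match pvTryInsert line m groups with
          | some gs => gs
          | none => groups ++ [[line]]) (pvBuckets assign n) =
        pvBuckets (segments.foldl (pvStepB m) (assign, n)).1
          (segments.foldl (pvStepB m) (assign, n)).2 := by
  induction segments with
  | nil => intro assign n _ _; rfl
  | cons line rest ih =>
      intro assign n hn hok
      obtain ⟨heq, hok', hn'⟩ := pv_step_eq m line assign n hn hok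
      simp only [List.foldl_cons]
      rw [heq]
      have : pvStepB m (assign, n) line =
          ((pvStepB m (assign, n) line).1, (pvStepB m (assign, n) line).2) := rfl
      rw [this]
      exact ih _ _ hn' hok'

-- ===== VERDICT (by name: the statement is the Claim_ definition above) =====
theorem merge_vertical_lines_connect_spec : Claim_equal_merge_vertical_lines_connect := by
  intro segments m _
  unfold Spec_merge_vertical_lines_connect merge_vertical_lines_connect
  unfold merge_vertical_lines_connect_alt
  have h0 : pvBuckets [] 0 = [] := by simp [pvBuckets]
  rw [← h0]
  exact pv_fold_eq m segments [] 0 (by omega) (by intro p hp; simp at hp)
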